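-- pv_equiv track=rewrite | github.com/satisfactorio/Atcoder_program | AtCoder/Competition/Beginner_Contest_242/C_1111gal_password.py | f
-- ===== SOURCE A (Python) =====
-- MOD = 998244353
--
-- def f(n):
--     dp = [[0] * 10 for i in range(n + 1)]
--     for i in range(1, 10):
--         dp[1][i] = 1
--
--     for d in range(2, n + 1):
--         for i in range(1, 10):
--             if i == 1:
--                 dp[d][i] = dp[d - 1][i] + dp[d - 1][i + 1]
--             elif 2 <= i <= 8:
--                 dp[d][i] = dp[d - 1][i - 1] + dp[d - 1][i] + dp[d - 1][i + 1]
--             else: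
--                 dp[d][i] = dp[d - 1][i - 1] + dp[d - 1][i]
--
--             dp[d][i] %= MOD
--
--     return sum(dp[n]) % MOD
-- ===== SOURCE B (Python) =====
-- MOD = 998244353
--
-- def f(n):
--     # 9x9 transition matrix M[i][j] = 1 iff digits i+1 and j+1 may be adjacent
--     M = [[1 if abs(i - j) <= 1 else 0 for j in range(9)] for i in range(9)]
--     R = [[1 if i == j else 0 for j in range(9)] for i in range(9)]
--
--     def mul(A, B):
--         return [[sum(A[i][k] * B[k][j] for k in range(9)) % MOD
--                  for j in range(9)] for i in range(9)]
--
--     e = n - 1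
--     while e > 0:
--         if e & 1:
--             R = mul(R, M)
--         M = mul(M, M)
--         e >>= 1
--     # answer = ones^T * M^(n-1) * ones = sum of all entries of M^(n-1)
--     return sum(R[i][j] for i in range(9) for j in range(9)) % MOD
-- ===== Notes on version B (the rewrite author's own statement) =====
-- stated objective: faster
-- what changed: Replaces the O(n) row-by-row DP table with binary exponentiation of the fixed 9x9 adjacency transition matrix, summing the entries of M^(n-1); Pre_ excludes nonpositive n, where A raises IndexError.
import Mathlib
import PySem

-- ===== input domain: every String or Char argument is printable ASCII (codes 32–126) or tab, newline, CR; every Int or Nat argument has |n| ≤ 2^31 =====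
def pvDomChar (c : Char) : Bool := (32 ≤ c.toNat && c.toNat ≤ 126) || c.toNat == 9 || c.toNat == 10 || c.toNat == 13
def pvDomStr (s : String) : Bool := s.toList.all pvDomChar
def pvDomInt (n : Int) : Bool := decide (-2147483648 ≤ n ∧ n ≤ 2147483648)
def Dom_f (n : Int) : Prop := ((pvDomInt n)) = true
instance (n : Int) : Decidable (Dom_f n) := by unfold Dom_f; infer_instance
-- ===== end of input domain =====

-- B replaces A's O(n) DP over rows by binary exponentiation of the fixed 9x9 transition
-- matrix (answer = sum of entries of M^(n-1) mod 998244353); objective: faster.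

def pvMOD : Int := 998244353

-- ===== PORT A =====
-- dp[1] = [0,1,1,1,1,1,1,1,1,1]
def rowOne : List Int := [0, 1, 1, 1, 1, 1, 1, 1, 1, 1]

-- A's inner loop: compute row d from row d-1 (index 0 stays 0, exactly as in A's table)
def stepRow (p : List Int) : List Int :=
  0 :: (List.range 9).map (fun i0 =>
    PySem.Int.mod
      (if i0 + 1 = 1 then p.getD 1 0 + p.getD 2 0
       else if 2 ≤ i0 + 1 ∧ i0 + 1 ≤ 8 then p.getD i0 0 + p.getD (i0 + 1) 0 + p.getD (i0 + 2) 0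
       else p.getD i0 0 + p.getD (i0 + 1) 0) pvMOD)

def f (n : Int) : Int :=
  PySem.Int.mod
    (((PySem.List.pyRange 2 (n + 1) 1).foldl (fun row _ => stepRow row) rowOne).foldl
      (· + ·) 0) pvMOD

-- ===== PORT B =====
def bMat : List (List Int) :=
  (List.range 9).map (fun i : Nat => (List.range 9).map (fun j : Nat =>
    if ((i : Int) - (j : Int)).natAbs ≤ 1 then (1 : Int) else 0))

def bId : List (List Int) :=
  (List.range 9).map (fun i : Nat => (List.range 9).map (fun j : Nat =>
    if i = j then (1 : Int) else 0))

def bMul (A B : List (List Int)) : List (List Int) :=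
  (List.range 9).map (fun i => (List.range 9).map (fun j =>
    PySem.Int.mod
      ((List.range 9).foldl (fun s k => s + (A.getD i []).getD k 0 * (B.getD k []).getD j 0) 0)
      pvMOD))

-- the while-loop: while e > 0: if e & 1: R = mul(R, M); M = mul(M, M); e >>= 1
def bPowLoop (e : Int) (M R : List (List Int)) : List (List Int) :=
  if _h : 0 < e then
    bPowLoop (PySem.Int.floordiv e 2) (bMul M M)
      (if PySem.Int.mod e 2 = 1 then bMul R M else R)
  else R
termination_by e.toNat
decreasing_by
  have h2 : PySem.Int.floordiv e 2 = e / 2 := PySem.Int.floordiv_eq_ediv_of_pos (by omega)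
  rw [h2]; omega

def f_alt (n : Int) : Int :=
  let R := bPowLoop (n - 1) bMat bId
  PySem.Int.mod
    ((List.range 9).foldl (fun s i =>
      s + (List.range 9).foldl (fun t j => t + (R.getD i []).getD j 0) 0) 0) pvMOD

-- ===== PRECONDITION & SPEC =====
-- Pre_ excludes nonpositive n, where A raises IndexError (the dp row for the first digit does not exist).
def Pre_f (n : Int) : Prop := 1 ≤ n
instance (n : Int) : Decidable (Pre_f n) := by unfold Pre_f; infer_instance
def pvWitness_f : Int := 3

def Spec_f (n : Int) (out : Int) : Prop := out = f_alt n
instance (n : Int) (out : Int) : Decidable (Spec_f n out) := by unfold Spec_f; infer_instance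

-- ===== CLAIM (what is proved, stated in full; the proofs are below) =====
def Claim_equal_f : Prop := ∀ (n : Int), Dom_f n → Pre_f n → Spec_f n (f n)

-- ===== LEMMAS AND PROOFS =====

-- the ZMod interpretation
abbrev K : Type := ZMod 998244353

def interp (A : List (List Int)) : Matrix (Fin 9) (Fin 9) K :=
  fun i j => (((A.getD i []).getD j 0 : Int) : K)

def vinterp (p : List Int) : Fin 9 → K := fun i => ((p.getD (i + 1) 0 : Int) : K)

theorem cast_pymod (a : Int) : ((PySem.Int.mod a pvMOD : Int) : K) = (a : K) := by
  rw [PySem.Int.mod_eq_emod_of_pos (by norm_num [pvMOD])]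
  show (((a % pvMOD : Int) : ZMod 998244353) : K) = _
  have : ((998244353 : Nat) : Int) = pvMOD := by norm_num [pvMOD]
  rw [← this, ZMod.intCast_mod]

theorem getD_range_map {α : Type} (g : Nat → α) (i : Nat) (hi : i < 9) (d : α) :
    (((List.range 9).map g).getD i d) = g i := by
  rw [List.getD_eq_getElem?_getD, List.getElem?_map, List.getElem?_range hi]
  rfl

theorem interp_bMul (A B : List (List Int)) :
    interp (bMul A B) = interp A * interp B := by
  funext i j
  show ((((bMul A B).getD i []).getD j 0 : Int) : K) = _
  rw [Matrix.mul_apply]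
  rw [show ((bMul A B).getD (i : Fin 9) []) = (bMul A B).getD (i : Nat) [] from rfl]
  unfold bMul
  rw [getD_range_map _ _ i.isLt, getD_range_map _ _ j.isLt, cast_pymod]
  simp only [List.range_succ, List.range_zero, List.nil_append, List.cons_append,
    List.foldl_cons, List.foldl_nil, Fin.sum_univ_succ, Finset.univ_eq_empty,
    Finset.sum_empty, interp, Fin.val_zero, Fin.val_succ]
  push_cast
  ring

theorem interp_bId : interp bId = 1 := by
  funext i j
  show ((((bId).getD (i : Nat) []).getD (j : Nat) 0 : Int) : K) = _
  unfold bId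
  rw [getD_range_map _ _ i.isLt, getD_range_map _ _ j.isLt]
  rw [Matrix.one_apply]
  by_cases h : i = j
  · simp [h]
  · have : (i : Nat) ≠ (j : Nat) := fun hc => h (Fin.ext hc)
    simp [h, this]

theorem bPowLoop_interp (k : Nat) : ∀ (e : Int), e.toNat = k → ∀ (M R : List (List Int)),
    interp (bPowLoop e M R) = interp R * (interp M) ^ e.toNat := by
  induction k using Nat.strong_induction_on with
  | _ k ih =>
    intro e hk M R
    rw [bPowLoop]
    by_cases h : 0 < e
    · rw [dif_pos h]
      have hfd : PySem.Int.floordiv e 2 = e / 2 := PySem.Int.floordiv_eq_ediv_of_pos (by omega)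
      have hmd : PySem.Int.mod e 2 = e % 2 := PySem.Int.mod_eq_emod_of_pos (by omega)
      have hlt : (e / 2).toNat < k := by omega
      have h2 : ((interp M) * (interp M)) ^ (e / 2).toNat = (interp M) ^ (2 * (e / 2).toNat) := by
        rw [two_mul, pow_add]
        exact (Commute.refl (interp M)).mul_pow _
      by_cases ho : PySem.Int.mod e 2 = 1
      · rw [if_pos ho, hfd, ih _ hlt _ rfl, interp_bMul, interp_bMul, h2]
        have : e.toNat = 2 * (e / 2).toNat + 1 := by omega
        rw [this, pow_succ']
        rw [mul_assoc]
      · rw [if_neg ho, hfd, ih _ hlt _ rfl, interp_bMul, h2]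
        have hm : e % 2 = 0 := by omega
        have : e.toNat = 2 * (e / 2).toNat := by omega
        rw [this]
    · rw [dif_neg h]
      have : e.toNat = 0 := by omega
      rw [this, pow_zero, mul_one]

-- A's fold over the range is iteration of stepRow
theorem foldl_const_iterate {α β : Type} (g : α → α) (l : List β) (a : α) :
    l.foldl (fun x _ => g x) a = g^[l.length] a := by
  induction l generalizing a with
  | nil => rfl
  | cons b t iht => simp [List.foldl_cons, iht, Function.iterate_succ_apply]

theorem vinterp_step (p : List Int) :
    vinterp (stepRow p) = (interp bMat).mulVec (vinterp p) := by
  have hM : ∀ (i j : Fin 9), interp bMat i j =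
      (if ((i : Int) - (j : Int)).natAbs ≤ 1 then (1 : K) else 0) := by
    intro i j
    show ((((bMat).getD (i : Nat) []).getD (j : Nat) 0 : Int) : K) = _
    unfold bMat
    rw [getD_range_map _ _ i.isLt, getD_range_map _ _ j.isLt]
    split_ifs with h <;> simp
  funext i
  rw [Matrix.mulVec, dotProduct]
  show (((stepRow p).getD ((i : Nat) + 1) 0 : Int) : K) = _
  have hrow : ∀ (m : Nat), m < 9 → ((stepRow p).getD (m + 1) 0) =
      PySem.Int.mod
        (if m + 1 = 1 then p.getD 1 0 + p.getD 2 0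
         else if 2 ≤ m + 1 ∧ m + 1 ≤ 8 then p.getD m 0 + p.getD (m + 1) 0 + p.getD (m + 2) 0
         else p.getD m 0 + p.getD (m + 1) 0) pvMOD := by
    intro m hm
    show (((List.range 9).map _).getD m 0) = _
    rw [getD_range_map _ _ hm]
  rw [hrow _ i.isLt, cast_pymod]
  simp only [Fin.sum_univ_succ, Finset.univ_eq_empty, Finset.sum_empty, hM, vinterp]
  fin_cases i <;> norm_num <;> push_cast <;> ring

theorem vinterp_iterate (k : Nat) :
    vinterp (stepRow^[k] rowOne) = ((interp bMat) ^ k).mulVec (vinterp rowOne) := by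
  induction k with
  | zero => simp
  | succ k ihk =>
    rw [Function.iterate_succ_apply', vinterp_step, ihk, Matrix.mulVec_mulVec, ← pow_succ']

-- casting A's final row sum
theorem cast_sum_stepRow (p : List Int) :
    (((stepRow p).foldl (· + ·) 0 : Int) : K) = ∑ i : Fin 9, vinterp (stepRow p) i := by
  simp [stepRow, List.range_succ, Fin.sum_univ_succ, vinterp]
  ring

-- casting B's final entry sum
theorem cast_sum_entries (R : List (List Int)) :
    (((List.range 9).foldl (fun s i =>
        s + (List.range 9).foldl (fun t j => t + (R.getD i []).getD j 0) 0) 0 : Int) : K)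
      = ∑ i : Fin 9, ∑ j : Fin 9, interp R i j := by
  simp [List.range_succ, Fin.sum_univ_succ, interp]
  ring

theorem mod_eq_of_cast_eq (a b : Int) (h : (a : K) = (b : K)) :
    PySem.Int.mod a pvMOD = PySem.Int.mod b pvMOD := by
  rw [PySem.Int.mod_eq_emod_of_pos (by norm_num [pvMOD]),
      PySem.Int.mod_eq_emod_of_pos (by norm_num [pvMOD])]
  have h' : a ≡ b [ZMOD (998244353 : Nat)] := (ZMod.intCast_eq_intCast_iff a b _).mp h
  have : a % ((998244353 : Nat) : Int) = b % ((998244353 : Nat) : Int) := h'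
  simpa [pvMOD] using this

-- ===== VERDICT (by name: the statement is the Claim_ definition above) =====
theorem f_spec : Claim_equal_f := by
  intro n _ hpre
  show f n = f_alt n
  unfold f f_alt
  apply mod_eq_of_cast_eq
  have hlen : (PySem.List.pyRange 2 (n + 1) 1).length = (n - 1).toNat := by
    rw [PySem.List.length_pyRange_one]; omega
  rw [foldl_const_iterate, hlen, cast_sum_entries]
  rw [bPowLoop_interp (n - 1).toNat (n - 1) rfl, interp_bId, one_mul]
  set k := (n - 1).toNat with hk
  have hvec : ∑ i : Fin 9, vinterp (stepRow^[k] rowOne) i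
      = ∑ i : Fin 9, ∑ j : Fin 9, (interp bMat ^ k) i j := by
    rw [vinterp_iterate]
    have hone : vinterp rowOne = fun _ => 1 := by
      funext i; fin_cases i <;> simp [vinterp, rowOne]
    rw [hone]
    simp [Matrix.mulVec, dotProduct]
  rw [← hvec]
  cases k with
  | zero =>
    simp only [Function.iterate_zero, id]
    have : ∑ i : Fin 9, vinterp rowOne i = 9 := by
      simp [Fin.sum_univ_succ, vinterp, rowOne]
      norm_num
    rw [this]
    norm_num [rowOne]
  | succ m =>
    rw [Function.iterate_succ_apply', cast_sum_stepRow]
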